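-- pv_equiv track=rewrite | github.com/pypi-data/pypi-mirror-378 | packages/notebookize/notebookize-0.1.2.tar.gz/notebookize-0.1.2/notebookize.py | _convert_to_percent_format
-- ===== SOURCE A (Python) =====
-- from typing import Callable, Any, Optional, Tuple, List, Union, TypeVar, Dict
--
-- def _convert_to_percent_format(body_source: str) -> List[str]:
--     """
--     Convert function body source to jupytext percent format.
--     Splits on blank lines to create cells. Comments are preserved in code cells.
--     """
--     lines = body_source.split("\n")
--     cells: List[str] = []
--     current_cell: List[str] = []
--
--     for line in lines:
--         # Check if this is a blank line
--         if not line.strip():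
--             # If we have content in current cell, save it and start a new one
--             if current_cell:
--                 cells.append("\n".join(current_cell))
--                 current_cell = []
--             continue
--
--         # Regular code line (including comments)
--         current_cell.append(line)
--
--     # Add any remaining content
--     if current_cell:
--         cells.append("\n".join(current_cell))
--
--     return cells
-- ===== SOURCE B (Python) =====
-- from typing import List
--
-- def _convert_to_percent_format(body_source: str) -> List[str]:
--     """Two-pointer scan: locate each maximal run of non-blank lines and slice it out."""
--     lines = body_source.split("\n")
--     n = len(lines)
--     cells: List[str] = []
--     i = 0
--     while i < n:
--         if not lines[i].strip():
--             i += 1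
--         else:
--             j = i + 1
--             while j < n and lines[j].strip():
--                 j += 1
--             cells.append("\n".join(lines[i:j]))
--             i = j
--     return cells
-- ===== Notes on version B (the rewrite author's own statement) =====
-- stated objective: alternative
-- what changed: Replaces A's buffer-accumulate-and-flush loop with an index-based two-pointer scan that finds each maximal non-blank run and slices it out directly.
import Mathlib
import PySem

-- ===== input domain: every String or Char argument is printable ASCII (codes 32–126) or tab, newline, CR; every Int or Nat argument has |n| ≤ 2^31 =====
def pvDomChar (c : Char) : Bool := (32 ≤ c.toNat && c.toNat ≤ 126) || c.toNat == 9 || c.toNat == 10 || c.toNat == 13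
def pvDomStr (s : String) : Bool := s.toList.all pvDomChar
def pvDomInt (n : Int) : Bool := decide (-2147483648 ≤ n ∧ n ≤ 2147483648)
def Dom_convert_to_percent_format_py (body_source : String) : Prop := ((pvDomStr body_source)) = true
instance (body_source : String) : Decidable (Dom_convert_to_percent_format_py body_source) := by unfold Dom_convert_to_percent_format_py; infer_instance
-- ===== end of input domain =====

-- B replaces A's accumulate-and-flush buffer loop with an index-based two-pointer scan over runs; alternative decomposition, same cost.


-- ===== PORT A =====
-- one step of A's for-loop over lines, state = (cells, current_cell)
def pvStepA (st : List String × List String) (line : String) : List String × List String :=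
  if PySem.Str.strip line == "" then
    if st.2 ≠ [] then (st.1 ++ [PySem.Str.join "\n" st.2], []) else st
  else (st.1, st.2 ++ [line])

-- A's trailing "if current_cell: cells.append(...)"
def pvFinishA (st : List String × List String) : List String :=
  if st.2 ≠ [] then st.1 ++ [PySem.Str.join "\n" st.2] else st.1

def convert_to_percent_format_py (body_source : String) : List String :=
  let lines := (PySem.Str.split? body_source "\n").getD []
  pvFinishA (lines.foldl pvStepA ([], []))

-- ===== PORT B =====
-- "not lines[k].strip()"
def pvBlank (line : String) : Bool := PySem.Str.strip line == ""

-- B's inner while loop: advance j while j < n and lines[j] is non-blank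
def pvRunEnd (lines : List String) (j : Nat) : Nat :=
  if h : j < lines.length then
    if pvBlank lines[j] then j else pvRunEnd lines (j + 1)
  else j
termination_by lines.length - j
decreasing_by exact Nat.sub_succ_lt_self _ _ h

theorem pvRunEnd_ge (lines : List String) (j : Nat) : j ≤ pvRunEnd lines j := by
  fun_induction pvRunEnd lines j with
  | case1 => omega
  | case2 _ _ _ ih => omega
  | case3 => omega

-- B's outer while loop; lines[i:j] = (lines.drop i).take (j - i), exact for 0 ≤ i ≤ j ≤ n
def pvScan (lines : List String) (cells : List String) (i : Nat) : List String :=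
  if h : i < lines.length then
    if pvBlank lines[i] then pvScan lines cells (i + 1)
    else
      let j := pvRunEnd lines (i + 1)
      pvScan lines (cells ++ [PySem.Str.join "\n" ((lines.drop i).take (j - i))]) j
  else cells
termination_by lines.length - i
decreasing_by
  · exact Nat.sub_succ_lt_self _ _ h
  · exact Nat.sub_lt_sub_left h (Nat.lt_of_lt_of_le (Nat.lt_succ_self i) (pvRunEnd_ge lines (i + 1)))

def convert_to_percent_format_py_alt (body_source : String) : List String :=
  pvScan ((PySem.Str.split? body_source "\n").getD []) [] 0

-- ===== PRECONDITION & SPEC =====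
def Spec_convert_to_percent_format_py (body_source : String) (out : List String) : Prop := out = convert_to_percent_format_py_alt body_source
instance (body_source : String) (out : List String) : Decidable (Spec_convert_to_percent_format_py body_source out) := by unfold Spec_convert_to_percent_format_py; infer_instance

-- ===== CLAIM (what is proved, stated in full; the proofs are below) =====
def Claim_equal_convert_to_percent_format_py : Prop := ∀ (body_source : String), Dom_convert_to_percent_format_py body_source → Spec_convert_to_percent_format_py body_source (convert_to_percent_format_py body_source)

-- ===== LEMMAS AND PROOFS =====

-- structural description of the maximal non-blank runs; both ports are reduced to it
def pvRunsL : List String → List String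
  | [] => []
  | l :: ls =>
    if pvBlank l then pvRunsL ls
    else PySem.Str.join "\n" (l :: ls.takeWhile (fun x => !pvBlank x)) ::
           pvRunsL (ls.dropWhile (fun x => !pvBlank x))
termination_by ls => ls.length
decreasing_by
  · exact Nat.lt_succ_self _
  · exact Nat.lt_succ_of_le (List.length_dropWhile_le _ _)

theorem pvTake_takeWhile {α : Type} (xs : List α) (p : α → Bool) :
    xs.take (xs.takeWhile p).length = xs.takeWhile p := by
  induction xs with
  | nil => simp
  | cons x xs ih => by_cases h : p x <;> simp [h, ih]

theorem pvDrop_takeWhile {α : Type} (xs : List α) (p : α → Bool) :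
    xs.drop (xs.takeWhile p).length = xs.dropWhile p := by
  induction xs with
  | nil => simp
  | cons x xs ih => by_cases h : p x <;> simp [h, ih]

theorem pvRunEnd_eq (lines : List String) (j : Nat) :
    pvRunEnd lines j = j + ((lines.drop j).takeWhile (fun x => !pvBlank x)).length := by
  fun_induction pvRunEnd lines j with
  | case1 j h hb =>
    rw [List.drop_eq_getElem_cons h]
    simp [hb]
  | case2 j h hb ih =>
    rw [List.drop_eq_getElem_cons h, List.takeWhile_cons, if_pos (by simp [hb])]
    simp [ih]; omega
  | case3 j h =>
    rw [List.drop_eq_nil_of_le (by omega)]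
    simp

theorem pvScan_eq (lines : List String) (cells : List String) (i : Nat) :
    pvScan lines cells i = cells ++ pvRunsL (lines.drop i) := by
  fun_induction pvScan lines cells i with
  | case1 cells i h hb ih =>
    rw [ih, List.drop_eq_getElem_cons h, pvRunsL]
    simp [hb]
  | case2 cells i h hb j ih =>
    rw [ih]
    have hre := pvRunEnd_eq lines (i + 1)
    have hdc : lines.drop i = lines[i] :: lines.drop (i + 1) := List.drop_eq_getElem_cons h
    have htw : ((lines.drop i).takeWhile (fun x => !pvBlank x))
        = lines[i] :: ((lines.drop (i + 1)).takeWhile (fun x => !pvBlank x)) := by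
      rw [hdc, List.takeWhile_cons, if_pos (by simp [hb])]
    have hj : pvRunEnd lines (i + 1) - i
        = ((lines.drop i).takeWhile (fun x => !pvBlank x)).length := by
      rw [htw]; simp [hre]; omega
    have htake : (lines.drop i).take (pvRunEnd lines (i + 1) - i)
        = (lines.drop i).takeWhile (fun x => !pvBlank x) := by
      rw [hj, pvTake_takeWhile]
    have hdrop : lines.drop (pvRunEnd lines (i + 1))
        = (lines.drop i).dropWhile (fun x => !pvBlank x) := by
      have h2 : lines.drop (pvRunEnd lines (i + 1))
          = (lines.drop i).drop (pvRunEnd lines (i + 1) - i) := by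
        rw [List.drop_drop]
        congr 1
        have := pvRunEnd_ge lines (i + 1); omega
      rw [h2, hj, pvDrop_takeWhile]
    rw [htake, hdrop, htw]
    have hdw : ((lines.drop i).dropWhile (fun x => !pvBlank x))
        = ((lines.drop (i + 1)).dropWhile (fun x => !pvBlank x)) := by
      rw [hdc, List.dropWhile_cons, if_pos (by simp [hb])]
    rw [hdw]
    conv_rhs => rw [hdc, pvRunsL]
    simp [hb]
  | case3 cells i h =>
    rw [List.drop_eq_nil_of_le (by omega), pvRunsL]
    simp

theorem pvFold_eq (lines : List String) :
    ∀ (cells cur : List String),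
      pvFinishA (lines.foldl pvStepA (cells, cur)) =
        if cur = [] then cells ++ pvRunsL lines
        else cells ++ PySem.Str.join "\n" (cur ++ lines.takeWhile (fun x => !pvBlank x)) ::
               pvRunsL (lines.dropWhile (fun x => !pvBlank x)) := by
  induction lines with
  | nil =>
    intro cells cur
    by_cases hc : cur = [] <;> simp [pvFinishA, hc, pvRunsL]
  | cons l ls ih =>
    intro cells cur
    by_cases hb : pvBlank l
    · have hb' : (PySem.Str.strip l == "") = true := by simpa [pvBlank] using hb
      by_cases hc : cur = []
      · rw [List.foldl_cons]
        simp only [pvStepA, if_pos hb']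
        rw [if_neg (by simp [hc]), ih]
        rw [if_pos hc, if_pos hc]
        conv_rhs => rw [pvRunsL]
        simp [hb]
      · rw [List.foldl_cons]
        simp only [pvStepA, if_pos hb']
        rw [if_pos (by simp [hc]), ih]
        rw [if_pos rfl, if_neg hc]
        rw [List.takeWhile_cons, if_neg (by simp [hb]), List.dropWhile_cons,
            if_neg (by simp [hb])]
        conv_rhs => rw [pvRunsL]
        simp [hb]
    · have hb' : ¬(PySem.Str.strip l == "") = true := by simpa [pvBlank] using hb
      rw [List.foldl_cons]
      simp only [pvStepA, if_neg hb']
      rw [ih, if_neg (by simp : ¬(cur ++ [l] = []))]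
      by_cases hc : cur = []
      · rw [if_pos hc, hc]
        conv_rhs => rw [pvRunsL]
        rw [if_neg (by simp [hb])]
        simp
      · rw [if_neg hc]
        rw [List.takeWhile_cons, if_pos (by simp [hb]), List.dropWhile_cons,
            if_pos (by simp [hb])]
        simp

-- ===== VERDICT (by name: the statement is the Claim_ definition above) =====
theorem convert_to_percent_format_py_spec : Claim_equal_convert_to_percent_format_py := by
  intro body_source _
  unfold Spec_convert_to_percent_format_py convert_to_percent_format_py convert_to_percent_format_py_alt
  rw [pvScan_eq, pvFold_eq]
  simp
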